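-- pv_equiv track=rewrite | github.com/mosesasai/predictive-islamic-game-theory | islamic_gt_codes/sim_08_centipede_muwakhat.py | backward_induction_classical
-- ===== SOURCE A (Python) =====
-- def backward_induction_classical(payoffs):
--     """Standard backward induction: always TAKE at node 1."""
--     n = len(payoffs) - 1  # Number of decision nodes
--     action = ['CONTINUE'] * n
--
--     # Player alternates: even nodes = Player 1, odd nodes = Player 2
--     for k in range(n - 1, -1, -1):
--         player = k % 2  # 0 or 1
--
--         # Payoff if TAKE now
--         take_payoff = payoffs[k][player]
--
--         # Payoff if CONTINUE (what happens at next node)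
--         if k == n - 1:
--             # Last node: continuing means equal split
--             continue_payoff = payoffs[n][player]
--         else:
--             # Find next take point or end
--             next_take = None
--             for j in range(k + 1, n):
--                 if action[j] == 'TAKE':
--                     next_take = j
--                     break
--             if next_take is not None:
--                 continue_payoff = payoffs[next_take][player]
--             else:
--                 continue_payoff = payoffs[n][player]
--
--         if take_payoff >= continue_payoff:
--             action[k] = 'TAKE'
--
--     return action
-- ===== SOURCE B (Python) =====
-- def backward_induction_classical(payoffs):
--     """Standard backward induction, single backward pass: keep the index of
--     the nearest TAKE node to the right instead of rescanning the action list."""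
--     n = len(payoffs) - 1
--     action = ['CONTINUE'] * n
--     next_take = n  # nearest TAKE strictly to the right of the current node; n = end of game
--     for k in range(n - 1, -1, -1):
--         player = k % 2
--         if payoffs[k][player] >= payoffs[next_take][player]:
--             action[k] = 'TAKE'
--             next_take = k
--     return action
-- ===== Notes on version B (the rewrite author's own statement) =====
-- stated objective: alternative
-- what changed: Instead of rescanning the action list at every node to find the next TAKE point, B maintains the nearest TAKE index incrementally during the single backward pass, removing the inner scan.
-- outside the precondition, e.g. on backward_induction_classical([[5], [3, 3]]): A returns ['TAKE'], B returns ['TAKE']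
import Mathlib
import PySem

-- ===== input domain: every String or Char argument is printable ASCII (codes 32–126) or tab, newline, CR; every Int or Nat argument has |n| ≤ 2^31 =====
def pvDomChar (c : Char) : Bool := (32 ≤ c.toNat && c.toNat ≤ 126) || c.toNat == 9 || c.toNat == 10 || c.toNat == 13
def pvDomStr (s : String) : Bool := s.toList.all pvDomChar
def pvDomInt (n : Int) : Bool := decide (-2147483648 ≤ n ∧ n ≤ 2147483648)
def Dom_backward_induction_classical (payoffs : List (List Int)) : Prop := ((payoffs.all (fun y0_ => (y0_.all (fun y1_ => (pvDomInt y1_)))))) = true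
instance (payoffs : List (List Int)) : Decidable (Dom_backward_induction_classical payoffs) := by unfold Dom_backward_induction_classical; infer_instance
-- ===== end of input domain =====

-- B replaces A's inner rescan for the next TAKE node by a next-TAKE index maintained
-- incrementally during the single backward pass; return values agree.

-- ===== PORT A =====
-- inner loop: 'for j in range(k+1, n): if action[j] == "TAKE": next_take = j; break'
def bicInnerA (action : List String) (k n : Int) : Option Int :=
  (PySem.List.pyRange (k + 1) n 1).foldl
    (fun nt j =>
      match nt with
      | some _ => nt
      | none => if PySem.List.pyGetD action j "" == "TAKE" then some j else nt)
    none

-- body of 'for k in range(n-1, -1, -1)'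
def bicStepA (payoffs : List (List Int)) (n : Int) (action : List String) (k : Int) : List String :=
  let player := PySem.Int.mod k 2
  let take_payoff := PySem.List.pyGetD (PySem.List.pyGetD payoffs k []) player 0
  let continue_payoff :=
    if k == n - 1 then PySem.List.pyGetD (PySem.List.pyGetD payoffs n []) player 0
    else
      match bicInnerA action k n with
      | some j => PySem.List.pyGetD (PySem.List.pyGetD payoffs j []) player 0
      | none => PySem.List.pyGetD (PySem.List.pyGetD payoffs n []) player 0
  if take_payoff ≥ continue_payoff then PySem.List.pySetD action k "TAKE" else action

def backward_induction_classical (payoffs : List (List Int)) : List String :=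
  let n : Int := (payoffs.length : Int) - 1
  let action := PySem.List.pyRepeat ["CONTINUE"] n
  (PySem.List.pyRange (n - 1) (-1) (-1)).foldl (bicStepA payoffs n) action

-- ===== PORT B =====
-- body of B's single backward loop; state = (action, next_take)
def bicStepB (payoffs : List (List Int)) (st : List String × Int) (k : Int) : List String × Int :=
  let player := PySem.Int.mod k 2
  if PySem.List.pyGetD (PySem.List.pyGetD payoffs k []) player 0 ≥
     PySem.List.pyGetD (PySem.List.pyGetD payoffs st.2 []) player 0
  then (PySem.List.pySetD st.1 k "TAKE", k)
  else st

def backward_induction_classical_alt (payoffs : List (List Int)) : List String :=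
  let n : Int := (payoffs.length : Int) - 1
  let action := PySem.List.pyRepeat ["CONTINUE"] n
  ((PySem.List.pyRange (n - 1) (-1) (-1)).foldl (bicStepB payoffs) (action, n)).1

-- ===== PRECONDITION & SPEC =====
-- Pre_ requires every payoff row to be a full pair (length ≥ 2) when there is at least one
-- decision node: Python A indexes rows at player indices 0 and 1 and raises IndexError on
-- shorter rows; on a few malformed inputs where only index 0 happens to be read A still
-- returns (see claim cites) — excluded as malformed centipede input (B behaves identically there).
def Pre_backward_induction_classical (payoffs : List (List Int)) : Prop :=
  payoffs.length ≤ 1 ∨ ∀ row ∈ payoffs, 2 ≤ row.length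
instance (payoffs : List (List Int)) : Decidable (Pre_backward_induction_classical payoffs) := by
  unfold Pre_backward_induction_classical; infer_instance

def pvWitness_backward_induction_classical : List (List Int) := [[3, 1], [2, 4], [5, 3], [4, 4]]

def Spec_backward_induction_classical (payoffs : List (List Int)) (out : List String) : Prop := out = backward_induction_classical_alt payoffs
instance (payoffs : List (List Int)) (out : List String) : Decidable (Spec_backward_induction_classical payoffs out) := by unfold Spec_backward_induction_classical; infer_instance

-- ===== CLAIM (what is proved, stated in full; the proofs are below) =====
def Claim_equal_backward_induction_classical : Prop := ∀ (payoffs : List (List Int)), Dom_backward_induction_classical payoffs → Pre_backward_induction_classical payoffs → Spec_backward_induction_classical payoffs (backward_induction_classical payoffs)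

-- ===== LEMMAS AND PROOFS =====

-- the value of A's 'next take point or end' scan, as an index (n = no TAKE to the right)
def bicFirstTake (action : List String) (m n : Int) : Int :=
  match (PySem.List.pyRange m n 1).find? (fun j => PySem.List.pyGetD action j "" == "TAKE") with
  | some j => j
  | none => n

theorem bicFoldlFirst_some (f : Option Int → Int → Option Int)
    (hf : ∀ x j, f (some x) j = some x) (L : List Int) (x : Int) :
    L.foldl f (some x) = some x := by
  induction L with
  | nil => rfl
  | cons a L ih => rw [List.foldl_cons, hf]; exact ih

theorem bicFoldlFirst_eq_find? (p : Int → Bool) (L : List Int) :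
    L.foldl (fun nt j =>
      match nt with
      | some _ => nt
      | none => if p j then some j else nt) none = L.find? p := by
  induction L with
  | nil => rfl
  | cons a L ih =>
    rw [List.foldl_cons, List.find?_cons]
    cases h : p a with
    | true =>
      simp only [if_true]
      exact bicFoldlFirst_some _ (fun x j => rfl) L a
    | false =>
      exact ih

theorem bicInnerA_eq_find? (action : List String) (k n : Int) :
    bicInnerA action k n =
      (PySem.List.pyRange (k + 1) n 1).find? (fun j => PySem.List.pyGetD action j "" == "TAKE") := by
  unfold bicInnerA
  exact bicFoldlFirst_eq_find? (fun j => PySem.List.pyGetD action j "" == "TAKE") _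

theorem bicStepA_def (payoffs : List (List Int)) (n : Int) (action : List String) (k : Int) :
    bicStepA payoffs n action k =
      (if PySem.List.pyGetD (PySem.List.pyGetD payoffs k []) (PySem.Int.mod k 2) 0 ≥
          (if (k == n - 1) then PySem.List.pyGetD (PySem.List.pyGetD payoffs n []) (PySem.Int.mod k 2) 0
           else
            match bicInnerA action k n with
            | some j => PySem.List.pyGetD (PySem.List.pyGetD payoffs j []) (PySem.Int.mod k 2) 0
            | none => PySem.List.pyGetD (PySem.List.pyGetD payoffs n []) (PySem.Int.mod k 2) 0)
       then PySem.List.pySetD action k "TAKE" else action) := rfl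

theorem bicStepB_def (payoffs : List (List Int)) (action : List String) (nt k : Int) :
    bicStepB payoffs (action, nt) k =
      (if PySem.List.pyGetD (PySem.List.pyGetD payoffs k []) (PySem.Int.mod k 2) 0 ≥
          PySem.List.pyGetD (PySem.List.pyGetD payoffs nt []) (PySem.Int.mod k 2) 0
       then (PySem.List.pySetD action k "TAKE", k) else (action, nt)) := rfl

theorem bic_loop (payoffs : List (List Int)) (n : Int) (m : Nat) (hmn : (m : Int) ≤ n)
    (action : List String) (hlen : (action.length : Int) = n)
    (hcont : ∀ j : Nat, j < m → action.getD j "" = "CONTINUE") :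
    (PySem.List.pyRange ((m : Int) - 1) (-1) (-1)).foldl (bicStepA payoffs n) action =
      ((PySem.List.pyRange ((m : Int) - 1) (-1) (-1)).foldl (bicStepB payoffs)
        (action, bicFirstTake action (m : Int) n)).1 := by
  induction m generalizing action with
  | zero =>
    rw [PySem.List.pyRange_neg_one_eq_nil (by norm_num)]
    rfl
  | succ m ih =>
    have hm : ((m + 1 : Nat) : Int) - 1 = (m : Int) := by push_cast; ring
    rw [hm, PySem.List.pyRange_neg_one_cons (by omega)]
    simp only [List.foldl_cons]
    have hmn' : (m : Int) < n := by push_cast at hmn; omega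
    -- A's continue payoff equals the payoff at the maintained next-take index
    have hft : bicFirstTake action ((m + 1 : Nat) : Int) n = bicFirstTake action ((m : Int) + 1) n := by
      push_cast; ring_nf
    have hcontA : ∀ player : Int,
        (if ((m : Int) == n - 1) then PySem.List.pyGetD (PySem.List.pyGetD payoffs n []) player 0
         else
          match bicInnerA action (m : Int) n with
          | some j => PySem.List.pyGetD (PySem.List.pyGetD payoffs j []) player 0
          | none => PySem.List.pyGetD (PySem.List.pyGetD payoffs n []) player 0)
        = PySem.List.pyGetD (PySem.List.pyGetD payoffs (bicFirstTake action ((m : Int) + 1) n) []) player 0 := by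
      intro player
      by_cases hlast : (m : Int) = n - 1
      · simp [hlast, bicFirstTake]
      · have hne : ((m : Int) == n - 1) = false := by simp [hlast]
        rw [hne, bicInnerA_eq_find?, bicFirstTake]
        rcases hfind : (PySem.List.pyRange ((m : Int) + 1) n 1).find?
            (fun j => PySem.List.pyGetD action j "" == "TAKE") with _ | j <;> simp
    rw [hft]
    by_cases hge : PySem.List.pyGetD (PySem.List.pyGetD payoffs (m : Int) []) (PySem.Int.mod (m : Int) 2) 0 ≥
        PySem.List.pyGetD (PySem.List.pyGetD payoffs (bicFirstTake action ((m : Int) + 1) n) [])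
          (PySem.Int.mod (m : Int) 2) 0
    · have hmlt : m < action.length := by omega
      have hA : bicStepA payoffs n action (m : Int) = action.set m "TAKE" := by
        rw [bicStepA_def, hcontA (PySem.Int.mod (m : Int) 2), if_pos hge]
        simp
      have hB : bicStepB payoffs (action, bicFirstTake action ((m : Int) + 1) n) (m : Int) =
          (action.set m "TAKE", (m : Int)) := by
        rw [bicStepB_def, if_pos hge]
        simp
      have hlen' : ((action.set m "TAKE").length : Int) = n := by simpa using hlen
      have hcont' : ∀ j : Nat, j < m → (action.set m "TAKE").getD j "" = "CONTINUE" := by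
        intro j hj
        rw [List.getD_eq_getElem?_getD, List.getElem?_set_ne (by omega)]
        rw [← List.getD_eq_getElem?_getD]
        exact hcont j (by omega)
      have hftnew : bicFirstTake (action.set m "TAKE") (m : Int) n = (m : Int) := by
        unfold bicFirstTake
        rw [PySem.List.pyRange_one_cons hmn', List.find?_cons]
        have : PySem.List.pyGetD (action.set m "TAKE") (m : Int) "" = "TAKE" := by
          rw [PySem.List.pyGetD_natCast, List.getD_eq_getElem?_getD, List.getElem?_set_self hmlt]
          rfl
        simp [this]
      rw [hA, hB]
      have := ih (by omega) (action.set m "TAKE") hlen' hcont'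
      rw [hftnew] at this
      exact this
    · have hA : bicStepA payoffs n action (m : Int) = action := by
        rw [bicStepA_def, hcontA (PySem.Int.mod (m : Int) 2), if_neg hge]
      have hB : bicStepB payoffs (action, bicFirstTake action ((m : Int) + 1) n) (m : Int) =
          (action, bicFirstTake action ((m : Int) + 1) n) := by
        rw [bicStepB_def, if_neg hge]
      have hftkeep : bicFirstTake action ((m : Int) + 1) n = bicFirstTake action (m : Int) n := by
        unfold bicFirstTake
        rw [PySem.List.pyRange_one_cons hmn', List.find?_cons]
        have : PySem.List.pyGetD action (m : Int) "" = "CONTINUE" := by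
          rw [PySem.List.pyGetD_natCast]; exact hcont m (by omega)
        simp [this]
      rw [hA, hB, hftkeep]
      exact ih (by omega) action hlen (fun j hj => hcont j (by omega))

theorem bic_eq (payoffs : List (List Int)) :
    backward_induction_classical payoffs = backward_induction_classical_alt payoffs := by
  unfold backward_induction_classical backward_induction_classical_alt
  simp only []
  cases payoffs with
  | nil => decide
  | cons row rest =>
    set pl := (row :: rest : List (List Int)) with hpl
    have hN : 1 ≤ pl.length := by simp [hpl]
    set n : Int := (pl.length : Int) - 1 with hn
    have hn0 : 0 ≤ n := by omega
    have hrep : PySem.List.pyRepeat ["CONTINUE"] n = List.replicate n.toNat "CONTINUE" :=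
      PySem.List.pyRepeat_singleton _ _
    have hcast : ((n.toNat : Nat) : Int) = n := Int.toNat_of_nonneg hn0
    have hlen : ((List.replicate n.toNat "CONTINUE").length : Int) = n := by
      simp [hcast]
    have hcont : ∀ j : Nat, j < n.toNat → (List.replicate n.toNat "CONTINUE").getD j "" = "CONTINUE" := by
      intro j hj
      rw [List.getD_eq_getElem?_getD, List.getElem?_replicate_of_lt hj]
      rfl
    have hft0 : bicFirstTake (List.replicate n.toNat "CONTINUE") ((n.toNat : Nat) : Int) n = n := by
      unfold bicFirstTake
      rw [hcast, PySem.List.pyRange_one_eq_nil (le_refl n)]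
      rfl
    have := bic_loop pl n n.toNat (by omega) (List.replicate n.toNat "CONTINUE") hlen hcont
    rw [hft0, hcast] at this
    rw [hrep, this]

-- ===== VERDICT (by name: the statement is the Claim_ definition above) =====
theorem backward_induction_classical_spec : Claim_equal_backward_induction_classical := by
  intro payoffs _ _
  unfold Spec_backward_induction_classical
  exact bic_eq payoffs
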